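-- pv_equiv track=rewrite | github.com/23andMe/bonsaitree | bonsaitree/v3/ibd.py | get_id_to_shared_ibd
-- ===== SOURCE A (Python) =====
-- def get_segs_between_sets(
--     id_set1: set[int],
--     id_set2: set[int],
--     ibd_seg_list: list[list[int]],
-- ):
--     """
--     Get all segments between two sets of IDs
--
--     Args:
--         id_set1: set of genotyped IDs
--         id_set2: set of genotyped IDs
--         ibd_seg_list: List of segments of the form
--             [[id1, id2, hap1, hap2, chrom, start, end, cm]]
--
--     Returns:
--         ibd_segs: list of segments with one ID in id_set1 and one
--                   ID in id_set2
--     """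
--     return [
--         s
--         for s in ibd_seg_list
--         if (s[0] in id_set1 and s[1] in id_set2)
--         or (s[1] in id_set1 and s[0] in id_set2)
--     ]
--
-- def get_id_to_shared_ibd(
--     id_set1: set[int],
--     id_set2: set[int],
--     ibd_seg_list: list[list[int]],
-- ):
--     """
--     Get a dict of the form {i : L,...} mapping
--     each ID in id_set1 to the total length they
--     share with all people in id_set2.
--
--     Args:
--         id_set1: set of IDs from one pedigree
--         id_set2: set of IDs from another pedigree
--         ibd_seg_list: List of segments of the form
--             [[id1, id2, hap1, hap2, chrom, start, end, cm]]
--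
--     Returns:
--         id_to_shared: dict of the form {i : L, ...}
--             mapping each ID in id_set1 to the total
--             amount shared with all people in id_set2
--     """
--     id_to_shared = {}
--     for i in id_set1:
--         shared_seg_list = get_segs_between_sets(
--             id_set1={i},
--             id_set2=id_set2,
--             ibd_seg_list=ibd_seg_list,
--         )
--         merged_regions = get_merged_regions(shared_seg_list)
--         L_tot = sum([e-s for c,s,e in merged_regions])
--         id_to_shared[i] = L_tot
--     return id_to_shared
--
-- def get_merged_regions(
--     ibd_seg_list: list[list[int]],
-- ):
--     """
--     Get all merged regions
--
--     Args:
--         ibd_seg_list: List of segments of the form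
--                         [[id1, id2, hap1, hap2, chrom, start, end, cm]]
--
--     Returns:
--         merged_regions: List of the form
--                         [[chrom, start, end],...]
--                         comprised of merged regions
--     """
--     if ibd_seg_list == []:
--         return []
--
--     ibd_seg_list = sorted(ibd_seg_list, key=lambda x: (x[4], x[5], x[6]))
--     start_seg = ibd_seg_list[0]
--     prev_chrom, prev_start, prev_end = start_seg[4:7]
--     merged_regions = []
--     for seg in ibd_seg_list:
--         chrom, start, end = seg[4:7]
--         if chrom == prev_chrom and start <= prev_end:
--             prev_end = end
--         else:
--             write_seg = [prev_chrom, prev_start, prev_end]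
--             prev_chrom = chrom
--             prev_start = start
--             prev_end = end
--             merged_regions.append(write_seg)
--     write_seg = [prev_chrom, prev_start, prev_end]
--     merged_regions.append(write_seg)
--     return merged_regions
-- ===== SOURCE B (Python) =====
-- def _total_merged_length(seg_list):
--     """Sum of merged-region lengths of seg_list (A's merge rule, accumulated directly)."""
--     if not seg_list:
--         return 0
--     seg_list = sorted(seg_list, key=lambda x: (x[4], x[5], x[6]))
--     prev_chrom, prev_start, prev_end = seg_list[0][4:7]
--     total = 0
--     for seg in seg_list:
--         chrom, start, end = seg[4:7]
--         if chrom == prev_chrom and start <= prev_end: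
--             prev_end = end
--         else:
--             total += prev_end - prev_start
--             prev_chrom, prev_start, prev_end = chrom, start, end
--     return total + (prev_end - prev_start)
--
--
-- def get_id_to_shared_ibd(id_set1, id_set2, ibd_seg_list):
--     # One pass over ibd_seg_list bucketing each segment under its id_set1 endpoint(s),
--     # then one merge per bucket: O(N log N + |id_set1|) instead of a scan per id.
--     if not id_set1:
--         return {}
--     set1 = set(id_set1)
--     set2 = set(id_set2)
--     buckets = {i: [] for i in id_set1}
--     for s in ibd_seg_list:
--         if s[0] in set1 and s[1] in set2:
--             buckets[s[0]].append(s)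
--         if s[1] in set1 and s[0] in set2 and s[1] != s[0]:
--             buckets[s[1]].append(s)
--     return {i: _total_merged_length(segs) for i, segs in buckets.items()}
-- ===== Notes on version B (the rewrite author's own statement) =====
-- stated objective: faster
-- what changed: Instead of re-filtering and re-merging the whole segment list once per id in id_set1, B makes a single pass over ibd_seg_list bucketing each segment under its id_set1 endpoint(s), then sorts and merges each bucket once, accumulating the total length directly instead of materialising merged-region lists.
import Mathlib
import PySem

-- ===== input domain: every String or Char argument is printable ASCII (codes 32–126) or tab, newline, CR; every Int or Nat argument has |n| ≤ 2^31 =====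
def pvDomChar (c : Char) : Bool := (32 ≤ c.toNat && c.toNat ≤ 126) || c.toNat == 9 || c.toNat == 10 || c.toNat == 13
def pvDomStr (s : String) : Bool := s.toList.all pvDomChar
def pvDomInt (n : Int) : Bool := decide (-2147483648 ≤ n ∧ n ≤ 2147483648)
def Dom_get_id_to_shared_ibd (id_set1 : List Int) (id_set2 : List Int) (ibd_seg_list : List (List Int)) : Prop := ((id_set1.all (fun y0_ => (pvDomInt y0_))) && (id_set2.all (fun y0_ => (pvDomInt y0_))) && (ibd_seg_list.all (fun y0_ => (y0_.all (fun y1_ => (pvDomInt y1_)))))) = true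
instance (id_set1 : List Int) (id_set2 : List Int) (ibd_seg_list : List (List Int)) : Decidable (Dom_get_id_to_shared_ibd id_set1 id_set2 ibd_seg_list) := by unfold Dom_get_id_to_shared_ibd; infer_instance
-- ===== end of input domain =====

-- B buckets all segments by their id_set1 endpoint in one pass and merges each
-- bucket once (accumulating the total directly), instead of A's scan per id.

-- shared helpers (both Pythons index segments and sort with the same key) --

-- s[i] for a nonnegative index; exact under Pre_ (index in range), Python raises outside
def pvG (s : List Int) (i : Nat) : Int := (PySem.List.pyGet? s (i : Int)).getD 0

-- strict comparison of the sort keys (x[4], x[5], x[6]) — Python's lexicographic tuple '<'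
def pvKeyLT (a b : List Int) : Bool :=
  decide (pvG a 4 < pvG b 4) ||
    (pvG a 4 == pvG b 4 &&
      (decide (pvG a 5 < pvG b 5) || (pvG a 5 == pvG b 5 && decide (pvG a 6 < pvG b 6))))

-- sorted(xs, key=lambda x: (x[4], x[5], x[6])): stable sort under the strict key
-- comparison, in the shape of PySem.List.sorted_eq_foldl_insertBy
def pvSortSegs (xs : List (List Int)) : List (List Int) :=
  xs.foldl (fun acc x => PySem.List.insertBy pvKeyLT x acc) []

-- ===== PORT A =====
def get_segs_between_sets (id_set1 : List Int) (id_set2 : List Int)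
    (ibd_seg_list : List (List Int)) : List (List Int) :=
  ibd_seg_list.filter (fun s =>
    (id_set1.contains (pvG s 0) && id_set2.contains (pvG s 1)) ||
    (id_set1.contains (pvG s 1) && id_set2.contains (pvG s 0)))

-- one iteration of A's merge loop; state = (prev_chrom, prev_start, prev_end, merged_regions)
def pvStepA (acc : Int × Int × Int × List (List Int)) (seg : List Int) :
    Int × Int × Int × List (List Int) :=
  if pvG seg 4 = acc.1 ∧ pvG seg 5 ≤ acc.2.2.1 then (acc.1, acc.2.1, pvG seg 6, acc.2.2.2)
  else (pvG seg 4, pvG seg 5, pvG seg 6, acc.2.2.2 ++ [[acc.1, acc.2.1, acc.2.2.1]])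

def get_merged_regions (ibd_seg_list : List (List Int)) : List (List Int) :=
  if ibd_seg_list = [] then []
  else
    let ss := pvSortSegs ibd_seg_list
    let s0 := ss.headD []        -- ss ≠ [] here, the default is never read
    let st := ss.foldl pvStepA (pvG s0 4, pvG s0 5, pvG s0 6, [])
    st.2.2.2 ++ [[st.1, st.2.1, st.2.2.1]]

def get_id_to_shared_ibd (id_set1 : List Int) (id_set2 : List Int)
    (ibd_seg_list : List (List Int)) : List (Int × Int) :=
  (id_set1.foldl (fun (d : PySem.Dict Int Int) i =>
      let shared := get_segs_between_sets [i] id_set2 ibd_seg_list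
      let merged := get_merged_regions shared
      let L := (merged.map (fun r => pvG r 2 - pvG r 1)).sum
      d.insert i L) PySem.Dict.empty).items

-- ===== PORT B =====
-- one iteration of B's merge loop; state = (prev_chrom, prev_start, prev_end, total)
def pvStepB (acc : Int × Int × Int × Int) (seg : List Int) : Int × Int × Int × Int :=
  if pvG seg 4 = acc.1 ∧ pvG seg 5 ≤ acc.2.2.1 then (acc.1, acc.2.1, pvG seg 6, acc.2.2.2)
  else (pvG seg 4, pvG seg 5, pvG seg 6, acc.2.2.2 + (acc.2.2.1 - acc.2.1))

def pvTotalMergedLength (seg_list : List (List Int)) : Int :=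
  if seg_list = [] then 0
  else
    let ss := pvSortSegs seg_list
    let s0 := ss.headD []
    let st := ss.foldl pvStepB (pvG s0 4, pvG s0 5, pvG s0 6, 0)
    st.2.2.2 + (st.2.2.1 - st.2.1)

-- one segment of B's bucketing pass
def pvBucketStep (id_set1 : List Int) (id_set2 : List Int)
    (d : PySem.Dict Int (List (List Int))) (s : List Int) : PySem.Dict Int (List (List Int)) :=
  let d1 := if id_set1.contains (pvG s 0) && id_set2.contains (pvG s 1)
            then d.modify (pvG s 0) [] (· ++ [s]) else d
  if id_set1.contains (pvG s 1) && id_set2.contains (pvG s 0) && !(pvG s 1 == pvG s 0)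
  then d1.modify (pvG s 1) [] (· ++ [s]) else d1

def get_id_to_shared_ibd_alt (id_set1 : List Int) (id_set2 : List Int)
    (ibd_seg_list : List (List Int)) : List (Int × Int) :=
  if id_set1 = [] then []
  else
    let buckets0 := id_set1.foldl
      (fun (d : PySem.Dict Int (List (List Int))) i => d.insert i []) PySem.Dict.empty
    let buckets := ibd_seg_list.foldl (pvBucketStep id_set1 id_set2) buckets0
    (buckets.items.foldl
      (fun (d : PySem.Dict Int Int) p => d.insert p.1 (pvTotalMergedLength p.2))
      PySem.Dict.empty).items

-- ===== PRECONDITION & SPEC =====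
-- Pre_ is exact: with a nonempty id_set1, Python A raises IndexError on a segment of
-- length < 2 and (while sorting) on a matching segment of length < 7; with id_set1
-- empty A never touches the segments and returns {}.
def Pre_get_id_to_shared_ibd (id_set1 : List Int) (id_set2 : List Int)
    (ibd_seg_list : List (List Int)) : Prop :=
  id_set1 = [] ∨ ∀ s ∈ ibd_seg_list, 2 ≤ s.length ∧
    (((s.getD 0 0 ∈ id_set1 ∧ s.getD 1 0 ∈ id_set2) ∨
      (s.getD 1 0 ∈ id_set1 ∧ s.getD 0 0 ∈ id_set2)) → 7 ≤ s.length)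
instance (id_set1 : List Int) (id_set2 : List Int) (ibd_seg_list : List (List Int)) : Decidable (Pre_get_id_to_shared_ibd id_set1 id_set2 ibd_seg_list) := by unfold Pre_get_id_to_shared_ibd; infer_instance

def pvWitness_get_id_to_shared_ibd : List Int × List Int × List (List Int) :=
  ([1, 3], [2], [[1, 2, 0, 0, 9, 5, 11, 4], [2, 1, 0, 1, 9, 8, 20, 4], [5, 6]])

def Spec_get_id_to_shared_ibd (id_set1 : List Int) (id_set2 : List Int) (ibd_seg_list : List (List Int)) (out : List (Int × Int)) : Prop := out = get_id_to_shared_ibd_alt id_set1 id_set2 ibd_seg_list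
instance (id_set1 : List Int) (id_set2 : List Int) (ibd_seg_list : List (List Int)) (out : List (Int × Int)) : Decidable (Spec_get_id_to_shared_ibd id_set1 id_set2 ibd_seg_list out) := by unfold Spec_get_id_to_shared_ibd; infer_instance

-- ===== CLAIM (what is proved, stated in full; the proofs are below) =====
def Claim_equal_get_id_to_shared_ibd : Prop := ∀ (id_set1 : List Int) (id_set2 : List Int) (ibd_seg_list : List (List Int)), Dom_get_id_to_shared_ibd id_set1 id_set2 ibd_seg_list → Pre_get_id_to_shared_ibd id_set1 id_set2 ibd_seg_list → Spec_get_id_to_shared_ibd id_set1 id_set2 ibd_seg_list (get_id_to_shared_ibd id_set1 id_set2 ibd_seg_list)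

-- ===== LEMMAS AND PROOFS =====

-- total (e - s) over a merged-region list
def pvSumReg (mr : List (List Int)) : Int := (mr.map (fun r => pvG r 2 - pvG r 1)).sum

theorem pvSumReg_append_singleton (mr : List (List Int)) (c s e : Int) :
    pvSumReg (mr ++ [[c, s, e]]) = pvSumReg mr + (e - s) := by
  simp [pvSumReg]; rfl

-- B's merge loop tracks A's: same (chrom, start, end) state, total = pvSumReg of A's regions
theorem pvFold_total (l : List (List Int)) :
    ∀ (pc ps pe : Int) (mr : List (List Int)),
      l.foldl pvStepB (pc, ps, pe, pvSumReg mr) =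
        ((l.foldl pvStepA (pc, ps, pe, mr)).1,
         (l.foldl pvStepA (pc, ps, pe, mr)).2.1,
         (l.foldl pvStepA (pc, ps, pe, mr)).2.2.1,
         pvSumReg (l.foldl pvStepA (pc, ps, pe, mr)).2.2.2) := by
  induction l with
  | nil => intro pc ps pe mr; rfl
  | cons x t ih =>
    intro pc ps pe mr
    by_cases h : pvG x 4 = pc ∧ pvG x 5 ≤ pe
    · simp only [List.foldl_cons, pvStepA, pvStepB, h]
      exact ih pc ps (pvG x 6) mr
    · simp only [List.foldl_cons, pvStepA, pvStepB, if_neg h]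
      have := ih (pvG x 4) (pvG x 5) (pvG x 6) (mr ++ [[pc, ps, pe]])
      rw [pvSumReg_append_singleton] at this
      exact this

-- per-list: A's merged-regions-then-sum equals B's direct accumulation
theorem pvTotal_eq (l : List (List Int)) :
    ((get_merged_regions l).map (fun r => pvG r 2 - pvG r 1)).sum = pvTotalMergedLength l := by
  by_cases h : l = []
  · subst h; rfl
  · have key := pvFold_total (pvSortSegs l) (pvG ((pvSortSegs l).headD []) 4)
      (pvG ((pvSortSegs l).headD []) 5) (pvG ((pvSortSegs l).headD []) 6) []
    simp only [show pvSumReg [] = (0 : Int) from rfl] at key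
    unfold get_merged_regions pvTotalMergedLength
    rw [if_neg h, if_neg h]
    simp only [key]
    rw [show ∀ mr : List (List Int), (mr.map (fun r => pvG r 2 - pvG r 1)).sum = pvSumReg mr
        from fun _ => rfl]
    rw [pvSumReg_append_singleton]

-- A's per-id filter predicate, with the singleton membership unfolded
def pvPred (id_set2 : List Int) (i : Int) (s : List Int) : Bool :=
  (pvG s 0 == i && id_set2.contains (pvG s 1)) || (pvG s 1 == i && id_set2.contains (pvG s 0))

theorem pvSegs_between_singleton (id_set2 : List Int) (i : Int) (segs : List (List Int)) :
    get_segs_between_sets [i] id_set2 segs = segs.filter (pvPred id_set2 i) := by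
  unfold get_segs_between_sets
  apply List.filter_congr
  intro s _
  simp [pvPred, Bool.beq_eq_decide_eq]

-- one bucketing step appends the segment to bucket i exactly when A's predicate holds
theorem pvBucketStep_getD (id_set1 id_set2 : List Int) (d : PySem.Dict Int (List (List Int)))
    (s : List Int) (i : Int) (hi : id_set1.contains i = true) :
    (pvBucketStep id_set1 id_set2 d s).getD i [] =
      d.getD i [] ++ (if pvPred id_set2 i s then [s] else []) := by
  have hi' : i ∈ id_set1 := by simpa using hi
  by_cases h0 : i = pvG s 0 <;> by_cases h1 : i = pvG s 1 <;>
    simp only [pvBucketStep, pvPred] <;>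
    split_ifs <;>
    simp_all [PySem.Dict.getD_modify] <;> tauto

theorem pvBucket_getD (id_set1 id_set2 : List Int) (segs : List (List Int)) (i : Int)
    (hi : id_set1.contains i = true) :
    ∀ d : PySem.Dict Int (List (List Int)),
      (segs.foldl (pvBucketStep id_set1 id_set2) d).getD i [] =
        d.getD i [] ++ segs.filter (pvPred id_set2 i) := by
  induction segs with
  | nil => intro d; simp
  | cons x t ih =>
    intro d
    rw [List.foldl_cons, ih (pvBucketStep id_set1 id_set2 d x),
      pvBucketStep_getD id_set1 id_set2 d x i hi, List.filter_cons]
    by_cases hp : pvPred id_set2 i x = true <;> simp [hp]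

-- keys are unchanged by the bucketing pass (every touched key is already present)
theorem pvBucket_keys (id_set1 id_set2 : List Int) (segs : List (List Int)) :
    ∀ d : PySem.Dict Int (List (List Int)),
      (∀ x : Int, id_set1.contains x = true → x ∈ d.keys) →
      (segs.foldl (pvBucketStep id_set1 id_set2) d).keys = d.keys := by
  have hstep : ∀ (d : PySem.Dict Int (List (List Int))) (s : List Int),
      (∀ x : Int, id_set1.contains x = true → x ∈ d.keys) →
      (pvBucketStep id_set1 id_set2 d s).keys = d.keys := by
    intro d s hk
    unfold pvBucketStep
    have m0 : ∀ (d' : PySem.Dict Int (List (List Int))) (k : Int), k ∈ d'.keys →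
        (d'.modify k [] (· ++ [s])).keys = d'.keys := by
      intro d' k hkm
      rw [PySem.Dict.keys_modify, PySem.Dict.keys_insert_of_contains]
      exact (PySem.Dict.contains_iff_mem_keys d' k).mpr hkm
    by_cases c1 : (id_set1.contains (pvG s 0) && id_set2.contains (pvG s 1)) = true <;>
      by_cases c2 : (id_set1.contains (pvG s 1) && id_set2.contains (pvG s 0)
          && !(pvG s 1 == pvG s 0)) = true <;>
      simp only [c1, c2, if_true] <;>
      simp_all <;>
      first
      | rfl
      | (rw [m0] <;> try rw [m0]) <;> simp_all [PySem.Dict.keys_modify]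
  induction segs with
  | nil => intro d _; rfl
  | cons x t ih =>
    intro d hk
    rw [List.foldl_cons, ih (pvBucketStep id_set1 id_set2 d x)
      (by intro y hy; rw [hstep d x hk]; exact hk y hy), hstep d x hk]

-- a fold of 'insert i (F i)' over l: items become the deduped l paired with F
theorem pvItems_foldl_insert {β : Type} (F : Int → β) (l : List Int) :
    ∀ (S : List Int) (d : PySem.Dict Int β),
      d.items = S.map (fun i => (i, F i)) →
      (l.foldl (fun d i => d.insert i (F i)) d).items =
        (PySem.Set.update S l).map (fun i => (i, F i)) := by
  induction l with
  | nil => intro S d h; simpa [PySem.Set.update]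
  | cons i t ih =>
    intro S d h
    have hkeys : d.keys = S := by
      simp [PySem.Dict.keys, h, List.map_map, Function.comp_def]
    have hcont : d.contains i = decide (i ∈ S) := by
      rw [PySem.Dict.contains_eq_decide_mem_keys, hkeys]
    rw [List.foldl_cons, PySem.Set.update_cons]
    by_cases hm : i ∈ S
    · have hadd : PySem.Set.add S i = S := by
        simp [PySem.Set.add, PySem.Set.contains, hm]
      rw [hadd]
      apply ih S
      rw [PySem.Dict.items_insert, if_pos (by simp [hcont, hm]), h, List.map_map]
      apply List.map_congr_left
      intro j _
      by_cases hj : j = i <;> simp [Function.comp, hj]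
    · have hadd : PySem.Set.add S i = S ++ [i] := by
        simp [PySem.Set.add, PySem.Set.contains, hm]
      rw [hadd]
      apply ih (S ++ [i])
      rw [PySem.Dict.items_insert, if_neg (by simp [hcont, hm]), h]
      simp

theorem get_id_to_shared_ibd_items (id_set1 id_set2 : List Int) (segs : List (List Int)) :
    get_id_to_shared_ibd id_set1 id_set2 segs =
      (PySem.Set.ofList id_set1).map (fun i =>
        (i, ((get_merged_regions (get_segs_between_sets [i] id_set2 segs)).map
              (fun r => pvG r 2 - pvG r 1)).sum)) := by
  have h := pvItems_foldl_insert
    (fun i => ((get_merged_regions (get_segs_between_sets [i] id_set2 segs)).map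
      (fun r => pvG r 2 - pvG r 1)).sum) id_set1 [] PySem.Dict.empty rfl
  rw [PySem.Set.update_nil_left] at h
  exact h

theorem get_id_to_shared_ibd_alt_items (id_set1 id_set2 : List Int) (segs : List (List Int))
    (h : id_set1 ≠ []) :
    get_id_to_shared_ibd_alt id_set1 id_set2 segs =
      (PySem.Set.ofList id_set1).map (fun i =>
        (i, pvTotalMergedLength (segs.filter (pvPred id_set2 i)))) := by
  unfold get_id_to_shared_ibd_alt
  rw [if_neg h]
  have h0 := pvItems_foldl_insert (fun _ => ([] : List (List Int))) id_set1 []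
    PySem.Dict.empty rfl
  rw [PySem.Set.update_nil_left] at h0
  set buckets0 := id_set1.foldl
    (fun (d : PySem.Dict Int (List (List Int))) i => d.insert i []) PySem.Dict.empty with hb0
  have hkeys0 : buckets0.keys = PySem.Set.ofList id_set1 := by
    simp [PySem.Dict.keys, h0, List.map_map, Function.comp_def]
  have hnod0 : buckets0.keys.Nodup := by rw [hkeys0]; exact PySem.Set.nodup_ofList id_set1
  set buckets := segs.foldl (pvBucketStep id_set1 id_set2) buckets0 with hb
  have hmem : ∀ x : Int, id_set1.contains x = true → x ∈ buckets0.keys := by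
    intro x hx
    rw [hkeys0, PySem.Set.mem_ofList]
    simpa using hx
  have hkeys : buckets.keys = PySem.Set.ofList id_set1 := by
    rw [hb, pvBucket_keys id_set1 id_set2 segs buckets0 hmem, hkeys0]
  have hnod : buckets.keys.Nodup := by rw [hkeys]; exact PySem.Set.nodup_ofList id_set1
  have hitems : buckets.items = (PySem.Set.ofList id_set1).map
      (fun i => (i, segs.filter (pvPred id_set2 i))) := by
    rw [PySem.Dict.items_eq_map_keys buckets hnod [], hkeys]
    apply List.map_congr_left
    intro i himem
    have hic : id_set1.contains i = true := by
      simp [(PySem.Set.mem_ofList id_set1 i).mp himem]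
    have hg0 : buckets0.getD i [] = [] := by
      apply PySem.Dict.getD_of_mem_items buckets0 _ hnod0
      rw [h0]
      exact List.mem_map.mpr ⟨i, himem, rfl⟩
    rw [hb, pvBucket_getD id_set1 id_set2 segs i hic buckets0, hg0, List.nil_append]
  have hfresh : ∀ p ∈ buckets.items, (PySem.Dict.empty : PySem.Dict Int Int).contains p.1 = false := by
    intro p _; simp
  have hnodmap : (buckets.items.map (fun p : Int × List (List Int) => p.1)).Nodup := hnod
  rw [PySem.Dict.items_foldl_insert_fresh buckets.items (fun p => p.1)
    (fun p => pvTotalMergedLength p.2) PySem.Dict.empty hfresh hnodmap]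
  rw [hitems, List.map_map]
  simp only [Function.comp_def]
  rw [show (PySem.Dict.empty : PySem.Dict Int Int).items = [] from rfl, List.nil_append]

-- ===== VERDICT (by name: the statement is the Claim_ definition above) =====
theorem get_id_to_shared_ibd_spec : Claim_equal_get_id_to_shared_ibd := by
  unfold Claim_equal_get_id_to_shared_ibd
  intro id1 id2 segs _ _
  unfold Spec_get_id_to_shared_ibd
  by_cases h : id1 = []
  · subst h; rfl
  · rw [get_id_to_shared_ibd_items, get_id_to_shared_ibd_alt_items id1 id2 segs h]
    refine List.map_congr_left ?_
    intro i _
    rw [pvSegs_between_singleton, pvTotal_eq]
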